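-- pv_equiv track=rewrite | github.com/kazukun2005/make_1135 | calculator/views.py | solve_recursively
-- ===== SOURCE A (Python) =====
-- memo = {}
--
-- def solve_recursively(nums):
--     if nums in memo: return memo[nums]
--     if len(nums) == 1: return [(nums[0], str(nums[0]))]
--     results = []
--     for i in range(1, len(nums)):
--         left_part, right_part = nums[:i], nums[i:]
--         left_results, right_results = solve_recursively(left_part), solve_recursively(right_part)
--         for val_l, expr_l in left_results:
--             for val_r, expr_r in right_results:
--                 results.append((val_l + val_r, f"({expr_l}+{expr_r})"))
--                 results.append((val_l - val_r, f"({expr_l}-{expr_r})"))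
--                 results.append((val_l * val_r, f"({expr_l}*{expr_r})"))
--                 if val_r != 0 and val_l % val_r == 0:
--                     results.append((val_l // val_r, f"({expr_l}/{expr_r})"))
--     memo[nums] = results
--     return results
-- ===== SOURCE B (Python) =====
-- # B: bottom-up interval DP over a table instead of memoized top-down recursion.
-- def solve_recursively(nums):
--     n = len(nums)
--     if n == 0:
--         return []
--     dp = [[None] * (n + 1) for _ in range(n)]
--     for i in range(n):
--         dp[i][i + 1] = [(nums[i], str(nums[i]))]
--     for length in range(2, n + 1):
--         for l in range(0, n - length + 1):
--             r = l + length
--             acc = []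
--             for i in range(l + 1, r):
--                 for val_l, expr_l in dp[l][i]:
--                     for val_r, expr_r in dp[i][r]:
--                         acc.append((val_l + val_r, f"({expr_l}+{expr_r})"))
--                         acc.append((val_l - val_r, f"({expr_l}-{expr_r})"))
--                         acc.append((val_l * val_r, f"({expr_l}*{expr_r})"))
--                         if val_r != 0 and val_l % val_r == 0:
--                             acc.append((val_l // val_r, f"({expr_l}/{expr_r})"))
--             dp[l][r] = acc
--     return dp[0][n]
-- ===== Notes on version B (the rewrite author's own statement) =====
-- stated objective: alternative
-- what changed: Replaced the memoized top-down recursion over list splits by a bottom-up interval dynamic program that fills a table of subinterval results in increasing interval length and returns the full-interval entry.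
import Mathlib
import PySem

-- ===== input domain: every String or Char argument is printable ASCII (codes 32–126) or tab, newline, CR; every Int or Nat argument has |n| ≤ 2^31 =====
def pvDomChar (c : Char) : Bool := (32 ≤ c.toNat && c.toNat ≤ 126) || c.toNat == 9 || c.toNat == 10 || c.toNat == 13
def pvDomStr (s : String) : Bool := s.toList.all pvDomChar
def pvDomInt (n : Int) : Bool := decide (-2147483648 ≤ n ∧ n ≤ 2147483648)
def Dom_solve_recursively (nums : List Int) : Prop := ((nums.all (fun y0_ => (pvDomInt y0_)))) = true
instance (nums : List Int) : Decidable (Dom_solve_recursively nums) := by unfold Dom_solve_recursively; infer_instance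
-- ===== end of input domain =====

-- B replaces A's memoized top-down recursion over splits by a bottom-up interval DP table
-- (same values in the same order); objective: alternative decomposition, no speed claim.
-- A's global memo is a pure cache and does not affect the returned value; the ports are cache-free.

-- shared inner-loop body: both Pythons contain literally the same two nested 'for' loops
-- appending the +, -, *, and guarded // results onto the running accumulator.
def pvCombine (results : List (Int × String)) (L R : List (Int × String)) : List (Int × String) :=
  L.foldl (fun acc pl =>
    R.foldl (fun acc pr =>
      let acc := acc ++ [(pl.1 + pr.1, "(" ++ pl.2 ++ "+" ++ pr.2 ++ ")")]
      let acc := acc ++ [(pl.1 - pr.1, "(" ++ pl.2 ++ "-" ++ pr.2 ++ ")")]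
      let acc := acc ++ [(pl.1 * pr.1, "(" ++ pl.2 ++ "*" ++ pr.2 ++ ")")]
      if pr.1 ≠ 0 ∧ PySem.Int.mod pl.1 pr.1 = 0 then
        acc ++ [(PySem.Int.floordiv pl.1 pr.1, "(" ++ pl.2 ++ "/" ++ pr.2 ++ ")")]
      else acc) acc) results

-- ===== PORT A =====
-- fuel = list length is only a totality guard; recursion on prefixes/suffixes as in A.
def solveGo : Nat → List Int → List (Int × String)
  | 0, _ => []
  | fuel + 1, nums =>
    if nums.length = 1 then
      -- indexing the first element of the length-1 list is taking its head
      [(nums.headI, PySem.Int.toStr nums.headI)]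
    else
      (List.range' 1 (nums.length - 1)).foldl
        (fun results i =>
          pvCombine results (solveGo fuel (nums.take i)) (solveGo fuel (nums.drop i))) []

def solve_recursively (nums : List Int) : List (Int × String) :=
  solveGo nums.length nums

-- ===== PORT B =====
def pvTblUpd (tbl : Nat → Nat → List (Int × String)) (l r : Nat) (v : List (Int × String)) :
    Nat → Nat → List (Int × String) :=
  fun l' r' => if l' = l ∧ r' = r then v else tbl l' r'

def pvCell (tbl : Nat → Nat → List (Int × String)) (l r : Nat) : List (Int × String) :=
  (List.range' (l + 1) (r - l - 1)).foldl (fun acc i => pvCombine acc (tbl l i) (tbl i r)) []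

def solve_recursively_alt (nums : List Int) : List (Int × String) :=
  let n := nums.length
  if n = 0 then []
  else
    let init : Nat → Nat → List (Int × String) :=
      (List.range n).foldl
        (fun tbl i =>
          pvTblUpd tbl i (i + 1)
            (match PySem.List.pyGet? nums (i : Int) with
             | some x => [(x, PySem.Int.toStr x)]
             | none => []))
        (fun _ _ => [])
    let tbl :=
      (List.range' 2 (n - 1)).foldl
        (fun tbl len =>
          (List.range (n - len + 1)).foldl
            (fun tbl l => pvTblUpd tbl l (l + len) (pvCell tbl l (l + len))) tbl)
        init
    tbl 0 n

-- ===== PRECONDITION & SPEC =====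
def Spec_solve_recursively (nums : List Int) (out : List (Int × String)) : Prop := out = solve_recursively_alt nums
instance (nums : List Int) (out : List (Int × String)) : Decidable (Spec_solve_recursively nums out) := by unfold Spec_solve_recursively; infer_instance

-- ===== CLAIM (what is proved, stated in full; the proofs are below) =====
def Claim_equal_solve_recursively : Prop := ∀ (nums : List Int), Dom_solve_recursively nums → Spec_solve_recursively nums (solve_recursively nums)

-- ===== LEMMAS AND PROOFS =====

-- A's result on the interval [l, r) of nums
def pvSv (nums : List Int) (l r : Nat) : List (Int × String) :=
  solve_recursively ((nums.drop l).take (r - l))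

-- the table agrees with A on every interval of span ≤ m
def pvCorrect (nums : List Int) (m : Nat) (tbl : Nat → Nat → List (Int × String)) : Prop :=
  ∀ l r, l < r → r ≤ nums.length → r - l ≤ m → tbl l r = pvSv nums l r

theorem solveGo_succ (f : Nat) : ∀ nums : List Int, nums.length ≤ f →
    solveGo (f + 1) nums = solveGo f nums := by
  induction f with
  | zero =>
    intro nums h
    have : nums = [] := List.eq_nil_of_length_eq_zero (Nat.le_zero.mp h)
    subst this; simp [solveGo]
  | succ g ih =>
    intro nums h
    conv_lhs => rw [solveGo]
    conv_rhs => rw [solveGo]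
    by_cases h1 : nums.length = 1
    · simp [h1]
    · rw [if_neg h1, if_neg h1]
      apply PySem.List.foldl_congr_mem
      intro acc i hi
      have hi' : 1 ≤ i ∧ i < 1 + (nums.length - 1) := by
        simpa using List.mem_range'_1.mp hi
      rw [ih (nums.take i) (by simp; omega), ih (nums.drop i) (by simp; omega)]

theorem solve_eq_go (f : Nat) : ∀ nums : List Int, nums.length ≤ f →
    solveGo f nums = solve_recursively nums := by
  induction f with
  | zero =>
    intro nums h
    have : nums = [] := List.eq_nil_of_length_eq_zero (Nat.le_zero.mp h)
    subst this; rfl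
  | succ g ih =>
    intro nums h
    by_cases hg : nums.length ≤ g
    · rw [solveGo_succ g nums hg, ih nums hg]
    · have : nums.length = g + 1 := by omega
      rw [solve_recursively, this]

theorem solve_unfold_big (nums : List Int) (h : nums.length ≠ 1) :
    solve_recursively nums =
      (List.range' 1 (nums.length - 1)).foldl
        (fun results i =>
          pvCombine results (solve_recursively (nums.take i)) (solve_recursively (nums.drop i))) [] := by
  rcases hn : nums.length with _ | m
  · have : nums = [] := List.eq_nil_of_length_eq_zero hn
    subst this; rfl
  · have hm : 1 ≤ m := by omega
    rw [solve_recursively, hn]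
    conv_lhs => rw [solveGo]
    rw [hn, if_neg (show ¬ (m + 1 = 1) by omega)]
    apply PySem.List.foldl_congr_mem
    intro acc i hi
    have hi' : 1 ≤ i ∧ i < 1 + (m + 1 - 1) := by
      simpa using List.mem_range'_1.mp hi
    rw [solve_eq_go m (nums.take i) (by simp; omega),
        solve_eq_go m (nums.drop i) (by simp; omega)]

theorem solve_single (x : Int) : solve_recursively [x] = [(x, PySem.Int.toStr x)] := rfl

theorem pvSv_single (nums : List Int) (l : Nat) (h : l < nums.length) :
    pvSv nums l (l + 1) = [(nums[l], PySem.Int.toStr nums[l])] := by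
  rw [pvSv]
  have h1 : l + 1 - l = 1 := by omega
  rw [h1, List.drop_eq_getElem_cons h]
  rw [show (1 : Nat) = 0 + 1 from rfl, List.take_succ_cons, List.take_zero]
  exact solve_single _

theorem init_entry (f : Nat → List (Int × String)) (k l r : Nat) :
    ((List.range k).foldl (fun tbl i => pvTblUpd tbl i (i + 1) (f i)) (fun _ _ => [])) l r
      = if l < k ∧ r = l + 1 then f l else [] := by
  induction k with
  | zero => simp
  | succ k ih =>
    rw [List.range_succ, List.foldl_append, List.foldl_cons, List.foldl_nil, pvTblUpd]
    by_cases hk : l = k ∧ r = k + 1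
    · simp [hk.1, hk.2]
    · simp only [if_neg hk, ih]
      by_cases h1 : l < k ∧ r = l + 1
      · simp [h1, Nat.lt_succ_of_lt h1.1]
      · have h2 : ¬ (l < k + 1 ∧ r = l + 1) := by
          rintro ⟨ha, hb⟩
          rcases Nat.lt_succ_iff_lt_or_eq.mp ha with hlt | heq
          · exact h1 ⟨hlt, hb⟩
          · exact hk ⟨heq, by omega⟩
        rw [if_neg h1, if_neg h2]

theorem upd_correct (nums : List Int) (m : Nat) (tbl : Nat → Nat → List (Int × String))
    (hc : pvCorrect nums m tbl) (l0 s : Nat) (hs : m < s) (v : List (Int × String)) :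
    pvCorrect nums m (pvTblUpd tbl l0 (l0 + s) v) := by
  intro l r hlr hr hle
  rw [pvTblUpd]
  have : ¬ (l = l0 ∧ r = l0 + s) := by rintro ⟨h1, h2⟩; omega
  rw [if_neg this]
  exact hc l r hlr hr hle

theorem cell_correct (nums : List Int) (s l : Nat) (tbl : Nat → Nat → List (Int × String))
    (hc : pvCorrect nums (s - 1) tbl) (hs : 2 ≤ s) (hln : l + s ≤ nums.length) :
    pvCell tbl l (l + s) = pvSv nums l (l + s) := by
  have hslice : ((nums.drop l).take s).length = s := by simp; omega
  have hL : pvCell tbl l (l + s)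
      = (List.range (s - 1)).foldl
          (fun acc t => pvCombine acc (pvSv nums l (l + 1 + t)) (pvSv nums (l + 1 + t) (l + s))) [] := by
    rw [pvCell]
    have hr : l + s - l - 1 = s - 1 := by omega
    rw [hr, List.range'_eq_map_range, List.foldl_map]
    apply PySem.List.foldl_congr_mem
    intro acc t ht
    have ht' : t < s - 1 := List.mem_range.mp ht
    have b1 : tbl l (l + 1 + t) = pvSv nums l (l + 1 + t) :=
      hc l (l + 1 + t) (by omega) (by omega) (by omega)
    have b2 : tbl (l + 1 + t) (l + s) = pvSv nums (l + 1 + t) (l + s) :=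
      hc (l + 1 + t) (l + s) (by omega) (by omega) (by omega)
    rw [b1, b2]
  have hR : pvSv nums l (l + s)
      = (List.range (s - 1)).foldl
          (fun acc t => pvCombine acc (pvSv nums l (l + 1 + t)) (pvSv nums (l + 1 + t) (l + s))) [] := by
    rw [pvSv]
    have h1 : l + s - l = s := by omega
    rw [h1, solve_unfold_big ((nums.drop l).take s) (by rw [hslice]; omega), hslice,
        List.range'_eq_map_range, List.foldl_map]
    apply PySem.List.foldl_congr_mem
    intro acc t ht
    have ht' : t < s - 1 := List.mem_range.mp ht
    have htake : ((nums.drop l).take s).take (1 + t) = (nums.drop l).take (1 + t) := by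
      rw [List.take_take]
      congr 1
      omega
    have hdrop : ((nums.drop l).take s).drop (1 + t) = (nums.drop (l + (1 + t))).take (s - (1 + t)) := by
      rw [List.drop_take, List.drop_drop]
    have e1 : solve_recursively (((nums.drop l).take s).take (1 + t)) = pvSv nums l (l + 1 + t) := by
      rw [htake, pvSv, show l + 1 + t - l = 1 + t from by omega]
    have e2 : solve_recursively (((nums.drop l).take s).drop (1 + t)) = pvSv nums (l + 1 + t) (l + s) := by
      rw [hdrop, pvSv, show l + s - (l + 1 + t) = s - (1 + t) from by omega,
          show l + 1 + t = l + (1 + t) from by omega]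
    rw [e1, e2]
  rw [hL, hR]

theorem inner_small (nums : List Int) (s : Nat) (hs : 1 ≤ s) :
    ∀ (xs : List Nat) (tbl : Nat → Nat → List (Int × String)), pvCorrect nums (s - 1) tbl →
      pvCorrect nums (s - 1)
        (xs.foldl (fun tbl l => pvTblUpd tbl l (l + s) (pvCell tbl l (l + s))) tbl) := by
  intro xs
  induction xs with
  | nil => intro tbl hc; exact hc
  | cons x rest ih =>
    intro tbl hc
    rw [List.foldl_cons]
    exact ih _ (upd_correct nums (s - 1) tbl hc x s (by omega) _)

theorem inner_entry (nums : List Int) (s : Nat) (hs : 2 ≤ s) :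
    ∀ (xs : List Nat) (tbl : Nat → Nat → List (Int × String)) (l0 : Nat),
      pvCorrect nums (s - 1) tbl → l0 + s ≤ nums.length →
      (l0 ∈ xs ∨ tbl l0 (l0 + s) = pvSv nums l0 (l0 + s)) →
      (xs.foldl (fun tbl l => pvTblUpd tbl l (l + s) (pvCell tbl l (l + s))) tbl) l0 (l0 + s)
        = pvSv nums l0 (l0 + s) := by
  intro xs
  induction xs with
  | nil =>
    intro tbl l0 hc hln h
    rcases h with h | h
    · exact absurd h (List.not_mem_nil)
    · exact h
  | cons x rest ih =>
    intro tbl l0 hc hln h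
    rw [List.foldl_cons]
    have hc1 : pvCorrect nums (s - 1) (pvTblUpd tbl x (x + s) (pvCell tbl x (x + s))) :=
      upd_correct nums (s - 1) tbl hc x s (by omega) _
    by_cases hx : l0 = x
    · apply ih _ l0 hc1 hln
      right
      subst hx
      rw [pvTblUpd, if_pos ⟨rfl, rfl⟩]
      exact cell_correct nums s l0 tbl hc hs hln
    · rcases h with hmem | heq
      · rcases List.mem_cons.mp hmem with h1 | h1
        · exact absurd h1 hx
        · exact ih _ l0 hc1 hln (Or.inl h1)
      · apply ih _ l0 hc1 hln
        right
        rw [pvTblUpd]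
        have : ¬ (l0 = x ∧ l0 + s = x + s) := by rintro ⟨h1, _⟩; exact hx h1
        rw [if_neg this]
        exact heq

theorem inner_correct (nums : List Int) (s : Nat) (tbl : Nat → Nat → List (Int × String))
    (hs : 2 ≤ s) (hsn : s ≤ nums.length) (hc : pvCorrect nums (s - 1) tbl) :
    pvCorrect nums s
      ((List.range (nums.length - s + 1)).foldl
        (fun tbl l => pvTblUpd tbl l (l + s) (pvCell tbl l (l + s))) tbl) := by
  intro l r hlr hr hle
  by_cases hsm : r - l ≤ s - 1
  · exact inner_small nums s (by omega) _ tbl hc l r hlr hr hsm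
  · have hrs : r = l + s := by omega
    subst hrs
    apply inner_entry nums s hs _ tbl l hc (by omega)
    left
    exact List.mem_range.mpr (by omega)

theorem outer_correct (nums : List Int) :
    ∀ (cnt s : Nat) (tbl : Nat → Nat → List (Int × String)), 2 ≤ s → s + cnt ≤ nums.length + 1 →
      pvCorrect nums (s - 1) tbl →
      pvCorrect nums (s - 1 + cnt)
        ((List.range' s cnt).foldl
          (fun tbl len =>
            (List.range (nums.length - len + 1)).foldl
              (fun tbl l => pvTblUpd tbl l (l + len) (pvCell tbl l (l + len))) tbl)
          tbl) := by
  intro cnt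
  induction cnt with
  | zero => intro s tbl hs _ hc; simpa using hc
  | succ cnt ih =>
    intro s tbl hs hn hc
    rw [List.range'_succ, List.foldl_cons]
    have h1 := inner_correct nums s tbl hs (by omega) hc
    have h2 := ih (s + 1) _ (by omega) (by omega) h1
    have he : s - 1 + (cnt + 1) = s + 1 - 1 + cnt := by omega
    rw [he]
    exact h2

-- initialization: the table is correct on all intervals of span 1
theorem init_correct (nums : List Int) :
    pvCorrect nums 1
      ((List.range nums.length).foldl
        (fun tbl i =>
          pvTblUpd tbl i (i + 1)
            (match PySem.List.pyGet? nums (i : Int) with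
             | some x => [(x, PySem.Int.toStr x)]
             | none => []))
        (fun _ _ => [])) := by
  intro l r hlr hr hle
  have hr1 : r = l + 1 := by omega
  subst hr1
  have hl : l < nums.length := by omega
  rw [init_entry, if_pos ⟨hl, rfl⟩]
  have hg : PySem.List.pyGet? nums (l : Int) = some nums[l] := by
    rw [PySem.List.pyGet?_natCast]
    exact List.getElem?_eq_getElem hl
  rw [hg, pvSv_single nums l hl]

-- ===== VERDICT (by name: the statement is the Claim_ definition above) =====
theorem solve_recursively_spec : Claim_equal_solve_recursively := by
  intro nums _
  rw [Spec_solve_recursively]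
  simp only [solve_recursively_alt]
  by_cases hn : nums.length = 0
  · have : nums = [] := List.eq_nil_of_length_eq_zero hn
    subst this; rfl
  · rw [if_neg hn]
    have hfin := outer_correct nums (nums.length - 1) 2 _ (by omega) (by omega)
      (init_correct nums)
    have he : 2 - 1 + (nums.length - 1) = nums.length := by omega
    rw [he] at hfin
    rw [hfin 0 nums.length (by omega) (by omega) (by omega), pvSv]
    simp
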